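-- pv_equiv track=rewrite | github.com/halo-drive/viewportNigeria | backend/diesel_routing_here.py | decode_unsigned_values
-- ===== SOURCE A (Python) =====
-- DECODING_TABLE = [
--     62, -1, -1, 52, 53, 54, 55, 56, 57, 58, 59, 60, 61, -1, -1, -1, -1, -1, -1, -1,
--     0, 1, 2, 3, 4, 5, 6, 7, 8, 9, 10, 11, 12, 13, 14, 15, 16, 17, 18, 19, 20, 21,
--     22, 23, 24, 25, -1, -1, -1, -1, 63, -1, 26, 27, 28, 29, 30, 31, 32, 33, 34, 35,
--     36, 37, 38, 39, 40, 41, 42, 43, 44, 45, 46, 47, 48, 49, 50, 51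
-- ]
--
-- def decode_char(char):
--     char_value = ord(char)
--     try: value = DECODING_TABLE[char_value - 45]
--     except IndexError: raise ValueError('Invalid encoding')
--     if value < 0: raise ValueError('Invalid encoding')
--     return value
--
-- def decode_unsigned_values(encoded):
--     result = shift = 0
--     for char in encoded:
--         value = decode_char(char)
--         result |= (value & 0x1F) << shift
--         if (value & 0x20) == 0:
--             yield result
--             result = shift = 0
--         else: shift += 5
--     if shift > 0: raise ValueError('Invalid encoding')
-- ===== SOURCE B (Python) =====
-- DECODING_TABLE = [
--     62, -1, -1, 52, 53, 54, 55, 56, 57, 58, 59, 60, 61, -1, -1, -1, -1, -1, -1, -1,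
--     0, 1, 2, 3, 4, 5, 6, 7, 8, 9, 10, 11, 12, 13, 14, 15, 16, 17, 18, 19, 20, 21,
--     22, 23, 24, 25, -1, -1, -1, -1, 63, -1, 26, 27, 28, 29, 30, 31, 32, 33, 34, 35,
--     36, 37, 38, 39, 40, 41, 42, 43, 44, 45, 46, 47, 48, 49, 50, 51
-- ]
--
-- def decode_char(char):
--     char_value = ord(char)
--     try: value = DECODING_TABLE[char_value - 45]
--     except IndexError: raise ValueError('Invalid encoding')
--     if value < 0: raise ValueError('Invalid encoding')
--     return value
--
-- def decode_unsigned_values(encoded):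
--     # eager decode pass, then group-buffer segmentation with a positional fold
--     values = [decode_char(c) for c in encoded]
--     group = []
--     for v in values:
--         group.append(v & 0x1F)
--         if not (v & 0x20):
--             n = 0
--             for chunk in reversed(group):
--                 n = n * 32 + chunk
--             yield n
--             group = []
--     if group:
--         raise ValueError('Invalid encoding')
-- ===== Notes on version B (the rewrite author's own statement) =====
-- stated objective: alternative
-- what changed: B decodes all characters in one eager pass, then segments values with a per-group chunk buffer folded back-to-front (n = n*32 + chunk), replacing A's inline or/shift running accumulator.
import Mathlib
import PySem

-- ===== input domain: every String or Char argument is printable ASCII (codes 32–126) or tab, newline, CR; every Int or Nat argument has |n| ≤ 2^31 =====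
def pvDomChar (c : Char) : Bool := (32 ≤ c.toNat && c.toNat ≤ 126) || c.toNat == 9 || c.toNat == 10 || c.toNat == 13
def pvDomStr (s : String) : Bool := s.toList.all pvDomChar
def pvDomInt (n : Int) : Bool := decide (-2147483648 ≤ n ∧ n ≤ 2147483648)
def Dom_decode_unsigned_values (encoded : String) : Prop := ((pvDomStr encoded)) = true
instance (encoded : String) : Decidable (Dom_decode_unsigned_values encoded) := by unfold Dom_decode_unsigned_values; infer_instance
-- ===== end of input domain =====

-- B replaces A's inline or/shift accumulator by an eager decode pass plus a per-group chunk
-- buffer folded positionally (objective: alternative decomposition, same O(n) cost).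
-- A and B are Python generators; the equivalence is about the fully-consumed return value
-- (list of yielded ints) on inputs where A returns without raising.


-- shared module context: DECODING_TABLE and decode_char (both Pythons use them verbatim)
def DECODING_TABLE : List Int := [
    62, -1, -1, 52, 53, 54, 55, 56, 57, 58, 59, 60, 61, -1, -1, -1, -1, -1, -1, -1,
    0, 1, 2, 3, 4, 5, 6, 7, 8, 9, 10, 11, 12, 13, 14, 15, 16, 17, 18, 19, 20, 21,
    22, 23, 24, 25, -1, -1, -1, -1, 63, -1, 26, 27, 28, 29, 30, 31, 32, 33, 34, 35,
    36, 37, 38, 39, 40, 41, 42, 43, 44, 45, 46, 47, 48, 49, 50, 51]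

-- decode_char: DECODING_TABLE[ord(char) - 45] with Python indexing (negative wrap, IndexError);
-- none = ValueError. Returns Nat: exact, since the accepted table entries are 0..63 (≥ 0 is checked).
def decodeChar? (c : Char) : Option Nat :=
  match PySem.List.pyGet? DECODING_TABLE ((c.toNat : Int) - 45) with
  | none => none
  | some v => if v < 0 then none else some v.toNat

-- ===== PORT A =====
-- A's loop: state (result, shift); nonnegative Python ints, so Nat &&&/|||/<<< are exact.
-- On ValueError (invalid char, or trailing shift > 0) Python's list() yields no value: outside
-- Pre_ the port returns the values accumulated so far / [] (unclaimed).
def pvALoop : List Char → Nat → Nat → List Int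
  | [], _result, _shift => []
  | c :: rest, result, shift =>
    match decodeChar? c with
    | none => []
    | some value =>
      let result' := result ||| ((value &&& 0x1F) <<< shift)
      if value &&& 0x20 == 0 then (result' : Int) :: pvALoop rest 0 0
      else pvALoop rest result' (shift + 5)

def decode_unsigned_values (encoded : String) : List Int := pvALoop encoded.toList 0 0

-- ===== PORT B =====
-- B: eager decode of all chars ([decode_char(c) for c in encoded]), then a loop keeping the
-- current group's 5-bit chunks and folding them back-to-front (n = n * 32 + chunk) at each yield.
def pvGroupFold (group : List Nat) : Nat := group.reverse.foldl (fun n chunk => n * 32 + chunk) 0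

def pvBLoop : List Nat → List Nat → List Int
  | [], _group => []
  | v :: rest, group =>
    let group' := group ++ [v &&& 0x1F]
    if v &&& 0x20 == 0 then (pvGroupFold group' : Int) :: pvBLoop rest []
    else pvBLoop rest group'

def decode_unsigned_values_alt (encoded : String) : List Int :=
  match encoded.toList.mapM decodeChar? with
  | none => []
  | some values => pvBLoop values []

-- ===== PRECONDITION & SPEC =====
-- Pre_: exactly the inputs where Python A returns (raises no ValueError): every char decodes
-- (table index in Python range, entry ≥ 0) and the last char, if any, has its continuation bit clear.
def Pre_decode_unsigned_values (encoded : String) : Prop :=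
  (encoded.toList.all (fun c => (decodeChar? c).isSome)) = true ∧
  ((encoded.toList.getLast?.bind decodeChar?).all (fun v => v &&& 0x20 == 0)) = true
instance (encoded : String) : Decidable (Pre_decode_unsigned_values encoded) := by
  unfold Pre_decode_unsigned_values; infer_instance

def pvWitness_decode_unsigned_values : String := "_pA"

def Spec_decode_unsigned_values (encoded : String) (out : List Int) : Prop := out = decode_unsigned_values_alt encoded
instance (encoded : String) (out : List Int) : Decidable (Spec_decode_unsigned_values encoded out) := by unfold Spec_decode_unsigned_values; infer_instance

-- ===== CLAIM (what is proved, stated in full; the proofs are below) =====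
def Claim_equal_decode_unsigned_values : Prop := ∀ (encoded : String), Dom_decode_unsigned_values encoded → Pre_decode_unsigned_values encoded → Spec_decode_unsigned_values encoded (decode_unsigned_values encoded)

-- ===== LEMMAS AND PROOFS =====

-- folding a group
theorem pvGroupFold_eq_foldr (g : List Nat) :
    pvGroupFold g = g.foldr (fun chunk acc => acc * 32 + chunk) 0 := by
  simp [pvGroupFold, List.foldl_reverse]

theorem pv32pow (n : Nat) : (32 : Nat) ^ n = 2 ^ (5 * n) := by
  rw [show (32 : Nat) = 2 ^ 5 by norm_num, ← pow_mul]

-- folding a group with a nonzero seed: the seed lands above the existing chunks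
theorem pvFoldr_seed (g : List Nat) (n : Nat) :
    g.foldr (fun chunk acc => acc * 32 + chunk) n =
      n * 32 ^ g.length + pvGroupFold g := by
  induction g generalizing n with
  | nil => simp [pvGroupFold]
  | cons c g ih =>
    rw [List.foldr_cons, ih, pvGroupFold_eq_foldr (c :: g),
      List.foldr_cons, ← pvGroupFold_eq_foldr]
    simp only [List.length_cons, pow_succ]
    ring

theorem pvGroupFold_append (g : List Nat) (x : Nat) :
    pvGroupFold (g ++ [x]) = x * 32 ^ g.length + pvGroupFold g := by
  rw [pvGroupFold_eq_foldr, List.foldr_append, List.foldr_cons, List.foldr_nil,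
    Nat.zero_mul, Nat.zero_add, pvFoldr_seed]

theorem pvGroupFold_lt (g : List Nat) (h : ∀ x ∈ g, x < 32) :
    pvGroupFold g < 32 ^ g.length := by
  induction g with
  | nil => simp [pvGroupFold]
  | cons c g ih =>
    have hc : c < 32 := h c (by simp)
    have := ih (fun x hx => h x (by simp [hx]))
    rw [pvGroupFold_eq_foldr] at *
    simp only [List.foldr_cons, List.length_cons, pow_succ]
    nlinarith

-- A's or/shift step equals appending the chunk to the group and re-folding
theorem pvStep_eq (g : List Nat) (v : Nat) (h : ∀ x ∈ g, x < 32) :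
    pvGroupFold g ||| ((v &&& 0x1F) <<< (5 * g.length)) = pvGroupFold (g ++ [v &&& 0x1F]) := by
  have hlt : pvGroupFold g < 2 ^ (5 * g.length) := by
    have := pvGroupFold_lt g h
    rwa [pv32pow] at this
  rw [Nat.lor_comm, ← Nat.shiftLeft_add_eq_or_of_lt hlt, pvGroupFold_append,
    Nat.shiftLeft_eq, pv32pow]

theorem pvChunk_lt (v : Nat) : v &&& 0x1F < 32 := by
  have : v &&& 0x1F = v % 32 := Nat.and_two_pow_sub_one_eq_mod v 5
  omega

-- loop correspondence: A's (result, shift) state is B's group buffer, folded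
theorem pvLoop_eq : ∀ (cs : List Char) (vs : List Nat) (g : List Nat),
    cs.mapM decodeChar? = some vs → (∀ x ∈ g, x < 32) →
    pvALoop cs (pvGroupFold g) (5 * g.length) = pvBLoop vs g := by
  intro cs
  induction cs with
  | nil =>
    intro vs g hm _
    simp [List.mapM_nil] at hm
    subst hm
    simp [pvALoop, pvBLoop]
  | cons c rest ih =>
    intro vs g hm hg
    rw [List.mapM_cons] at hm
    cases hv : decodeChar? c with
    | none => simp [hv] at hm
    | some v =>
      rw [hv] at hm
      cases hm' : rest.mapM decodeChar? with
      | none => simp [hm'] at hm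
      | some vs' =>
        rw [hm'] at hm
        simp at hm
        subst hm
        have hg' : ∀ x ∈ g ++ [v &&& 0x1F], x < 32 := by
          intro x hx
          rcases List.mem_append.mp hx with h | h
          · exact hg x h
          · simp at h; subst h; exact pvChunk_lt v
        rw [pvALoop.eq_def, pvBLoop.eq_def]
        simp only [hv]
        rw [pvStep_eq g v hg]
        by_cases hb : v &&& 0x20 == 0
        · have := ih vs' [] hm' (by simp)
          simp only [pvGroupFold, List.reverse_nil, List.foldl_nil, List.length_nil,
            Nat.mul_zero] at this
          simp [hb, this]
        · simp only [if_neg hb]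
          have hlen : 5 * g.length + 5 = 5 * (g ++ [v &&& 0x1F]).length := by
            simp [List.length_append]; ring
          rw [hlen]
          exact ih vs' (g ++ [v &&& 0x1F]) hm' hg'

theorem pvMapM_some (cs : List Char) (h : cs.all (fun c => (decodeChar? c).isSome) = true) :
    ∃ vs, cs.mapM decodeChar? = some vs := by
  induction cs with
  | nil => exact ⟨[], rfl⟩
  | cons c rest ih =>
    simp only [List.all_cons, Bool.and_eq_true] at h
    obtain ⟨vs, hvs⟩ := ih h.2
    obtain ⟨v, hv⟩ := Option.isSome_iff_exists.mp h.1
    exact ⟨v :: vs, by rw [List.mapM_cons, hv, hvs]; rfl⟩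

-- ===== VERDICT (by name: the statement is the Claim_ definition above) =====
theorem decode_unsigned_values_spec : Claim_equal_decode_unsigned_values := by
  intro encoded _hdom hpre
  unfold Spec_decode_unsigned_values decode_unsigned_values decode_unsigned_values_alt
  obtain ⟨vs, hvs⟩ := pvMapM_some encoded.toList hpre.1
  rw [hvs]
  have := pvLoop_eq encoded.toList vs [] hvs (by simp)
  simpa [pvGroupFold] using this
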